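-- pv_equiv track=rewrite | github.com/amirnafisa/InformationRetrieval | Default_model.py | tag_pred_labels
-- ===== SOURCE A (Python) =====
-- def tag_pred_labels(doc_tokens, pred_NPs):
--
--     pred_output = []
--     for i, sents in doc_tokens.items():
--         for j, tokens in enumerate(sents):
--             for k, token in enumerate(tokens):
--                 pred_output.append('O')
--                 filter_CP = list(filter(lambda t: token in t, pred_NPs))
--                 filter_CP = list(filter(lambda t: t == tokens[k-t.index(token):k-t.index(token)+len(t)], filter_CP))
--                 pred_output[-1] = 'CP' if filter_CP else 'O'
--
--     return pred_output
-- ===== SOURCE B (Python) =====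
-- def tag_pred_labels(doc_tokens, pred_NPs):
--     # Invert pred_NPs once: token -> [(first index of token in NP, NP), ...]
--     index = {}
--     for t in pred_NPs:
--         for tok in dict.fromkeys(t):
--             index.setdefault(tok, []).append((t.index(tok), t))
--     pred_output = []
--     for sents in doc_tokens.values():
--         for tokens in sents:
--             for k, token in enumerate(tokens):
--                 pred_output.append('CP' if any(
--                     pos <= k and tokens[k - pos:k - pos + len(t)] == t
--                     for pos, t in index.get(token, []))
--                     else 'O')
--     return pred_output
-- ===== Notes on version B (the rewrite author's own statement) =====
-- stated objective: faster
-- what changed: B builds, in one pass over pred_NPs, a dict mapping each token to the noun phrases containing it (with the token's first index), so each sentence token checks only its matching NPs instead of filter-scanning all of pred_NPs twice per token.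
import Mathlib
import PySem

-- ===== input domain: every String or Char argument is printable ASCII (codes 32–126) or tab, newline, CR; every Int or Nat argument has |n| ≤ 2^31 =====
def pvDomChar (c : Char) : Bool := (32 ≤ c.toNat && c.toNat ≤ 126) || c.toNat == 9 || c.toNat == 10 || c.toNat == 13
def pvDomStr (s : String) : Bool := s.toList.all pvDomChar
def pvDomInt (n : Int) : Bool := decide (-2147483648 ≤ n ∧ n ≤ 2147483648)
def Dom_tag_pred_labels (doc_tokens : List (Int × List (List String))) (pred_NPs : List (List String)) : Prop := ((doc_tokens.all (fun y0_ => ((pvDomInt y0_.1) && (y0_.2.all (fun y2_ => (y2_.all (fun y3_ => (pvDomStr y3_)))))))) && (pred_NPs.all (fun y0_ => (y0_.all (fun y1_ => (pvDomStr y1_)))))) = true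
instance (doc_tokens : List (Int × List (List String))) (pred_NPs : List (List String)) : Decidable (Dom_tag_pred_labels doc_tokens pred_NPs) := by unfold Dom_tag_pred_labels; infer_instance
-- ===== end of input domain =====

-- B replaces A's two filter passes over all of pred_NPs per token by a token→NPs dict built once (objective: faster).

-- ===== PORT A =====
-- literal transliteration of A: per token, filter pred_NPs by membership, then by alignment of
-- the slice at k - t.index(token); append 'O' then overwrite the last slot.
def tag_pred_labels (doc_tokens : List (Int × List (List String))) (pred_NPs : List (List String)) : List String :=
  (PySem.Dict.ofList doc_tokens).items.foldl
    (fun pred_output isents =>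
      (PySem.List.enumerate isents.2 0).foldl
        (fun pred_output jtokens =>
          (PySem.List.enumerate jtokens.2 0).foldl
            (fun pred_output ktoken =>
              let pred_output := pred_output ++ ["O"]
              let filter_CP := pred_NPs.filter (fun t => decide (ktoken.2 ∈ t))
              let filter_CP := filter_CP.filter (fun t =>
                match PySem.List.index? t ktoken.2 with
                | some idx => t == PySem.List.slice jtokens.2 (some (ktoken.1 - (idx : Int))) (some (ktoken.1 - (idx : Int) + (t.length : Int)))
                | none => false)  -- unreachable: token ∈ t from the first filter (Python would raise ValueError)
              pred_output.dropLast ++ [if filter_CP ≠ [] then "CP" else "O"])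
            pred_output)
        pred_output)
    []

-- ===== PORT B =====
-- Source B's inverted index: token -> [(first index of token in that NP, NP), ...] in pred_NPs order
def pvIndexNPs (pred_NPs : List (List String)) : PySem.Dict String (List (Int × List String)) :=
  pred_NPs.foldl
    (fun index t =>
      (PySem.List.dedup t).foldl
        (fun index tok =>
          -- index.setdefault(tok, []).append((t.index(tok), t)); t.index cannot raise here: tok ∈ t
          PySem.Dict.modify index tok []
            (fun l => l ++ [((((PySem.List.index? t tok).getD 0 : Nat) : Int), t)]))
        index)
    PySem.Dict.empty

def tag_pred_labels_alt (doc_tokens : List (Int × List (List String))) (pred_NPs : List (List String)) : List String :=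
  let index := pvIndexNPs pred_NPs
  (PySem.Dict.ofList doc_tokens).values.foldl
    (fun pred_output sents =>
      sents.foldl
        (fun pred_output tokens =>
          (PySem.List.enumerate tokens 0).foldl
            (fun pred_output ktoken =>
              pred_output ++
                [if (index.getD ktoken.2 []).any (fun pt =>
                      decide (pt.1 ≤ ktoken.1) &&
                        (pt.2 == PySem.List.slice tokens (some (ktoken.1 - pt.1)) (some (ktoken.1 - pt.1 + (pt.2.length : Int)))))
                 then "CP" else "O"])
            pred_output)
        pred_output)
    []

-- ===== PRECONDITION & SPEC =====
def Spec_tag_pred_labels (doc_tokens : List (Int × List (List String))) (pred_NPs : List (List String)) (out : List String) : Prop := out = tag_pred_labels_alt doc_tokens pred_NPs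
instance (doc_tokens : List (Int × List (List String))) (pred_NPs : List (List String)) (out : List String) : Decidable (Spec_tag_pred_labels doc_tokens pred_NPs out) := by unfold Spec_tag_pred_labels; infer_instance

-- ===== CLAIM (what is proved, stated in full; the proofs are below) =====
def Claim_equal_tag_pred_labels : Prop := ∀ (doc_tokens : List (Int × List (List String))) (pred_NPs : List (List String)), Dom_tag_pred_labels doc_tokens pred_NPs → Spec_tag_pred_labels doc_tokens pred_NPs (tag_pred_labels doc_tokens pred_NPs)

-- ===== LEMMAS AND PROOFS =====

-- a fold of modify-append over a Nodup key list appends v tok to the tok posting list iff tok ∈ L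
theorem pv_getD_foldl_modify (v : String → Int × List String) (L : List String)
    (d : PySem.Dict String (List (Int × List String))) (tok : String) (hnd : L.Nodup) :
    ((L.foldl (fun d x => PySem.Dict.modify d x [] (fun l => l ++ [v x])) d).getD tok []) =
      d.getD tok [] ++ (if tok ∈ L then [v tok] else []) := by
  induction L generalizing d with
  | nil => simp
  | cons x L ih =>
    simp only [List.foldl_cons]
    rw [ih _ (List.Nodup.of_cons hnd)]
    rw [PySem.Dict.getD_modify]
    by_cases hx : tok = x
    · subst hx
      have : tok ∉ L := (List.nodup_cons.mp hnd).1
      simp [this]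
    · simp [hx]

-- the posting list of tok in the inverted index, characterised by filterMap
theorem pv_index_getD (pred_NPs : List (List String)) (tok : String) :
    (pvIndexNPs pred_NPs).getD tok [] =
      pred_NPs.filterMap (fun t => (PySem.List.index? t tok).map (fun (i : Nat) => ((i : Int), t))) := by
  unfold pvIndexNPs
  suffices h : ∀ (ps : List (List String)) (d : PySem.Dict String (List (Int × List String))),
      (ps.foldl (fun index t => (PySem.List.dedup t).foldl
          (fun index tok' => PySem.Dict.modify index tok' []
            (fun l => l ++ [((((PySem.List.index? t tok').getD 0 : Nat) : Int), t)])) index) d).getD tok [] =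
        d.getD tok [] ++ ps.filterMap (fun t => (PySem.List.index? t tok).map (fun (i : Nat) => ((i : Int), t))) by
    rw [h]; simp
  intro ps
  induction ps with
  | nil => simp
  | cons t ps ih =>
    intro d
    simp only [List.foldl_cons]
    rw [ih]
    rw [pv_getD_foldl_modify (fun tok' => ((((PySem.List.index? t tok').getD 0 : Nat) : Int), t))
        (PySem.List.dedup t) d tok (PySem.Set.nodup_ofList t)]
    rw [List.filterMap_cons]
    cases hidx : PySem.List.index? t tok with
    | none =>
      have : tok ∉ t := (PySem.List.index?_eq_none_iff t tok).mp hidx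
      simp [this]
    | some i =>
      obtain ⟨hilt, hEq, -⟩ := PySem.List.getElem_of_index?_eq_some hidx
      have htok : tok ∈ t := hEq ▸ List.getElem_mem hilt
      simp [htok]

-- any over a filterMap
theorem pv_any_filterMap (l : List (List String)) (g : List String → Option (Int × List String))
    (c : Int × List String → Bool) :
    (l.filterMap g).any c = l.any (fun t => ((g t).map c).getD false) := by
  induction l with
  | nil => rfl
  | cons x xs ih => cases h : g x <;> simp [h, ih]

-- a misaligned (negative-start) slice is strictly shorter than the NP, so never equal to it
theorem pv_slice_len_lt (xs ys : List String) (k i : Int) (hk0 : 0 ≤ k) (hneg : k - i < 0)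
    (hi : i < (ys.length : Int)) :
    (PySem.List.slice xs (some (k - i)) (some (k - i + ys.length))).length < ys.length := by
  simp [PySem.List.slice, PySem.List.clampIdx]
  split_ifs <;> omega

-- the two per-token conditions agree
theorem pv_cond_eq (pred_NPs : List (List String)) (tokens : List String) (token : String)
    (k : Int) (hk0 : 0 ≤ k) :
    ((pred_NPs.filter (fun t => decide (token ∈ t))).filter (fun t =>
        match PySem.List.index? t token with
        | some idx => t == PySem.List.slice tokens (some (k - (idx : Int))) (some (k - (idx : Int) + (t.length : Int)))
        | none => false) ≠ []) ↔
      (((pvIndexNPs pred_NPs).getD token []).any (fun pt =>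
          decide (pt.1 ≤ k) &&
            (pt.2 == PySem.List.slice tokens (some (k - pt.1)) (some (k - pt.1 + (pt.2.length : Int))))) = true) := by
  rw [pv_index_getD, pv_any_filterMap, List.filter_filter, ne_eq, List.filter_eq_nil_iff,
    List.any_eq_true]
  push Not
  apply exists_congr
  intro t
  apply and_congr_right
  intro _
  cases hidx : PySem.List.index? t token with
  | none =>
    have : token ∉ t := (PySem.List.index?_eq_none_iff t token).mp hidx
    simp [this]
  | some i =>
    obtain ⟨hilt, hEq, -⟩ := PySem.List.getElem_of_index?_eq_some hidx
    have htok : token ∈ t := hEq ▸ List.getElem_mem hilt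
    simp only [Option.map_some, Option.getD_some, htok, decide_true, Bool.and_true,
      Bool.and_eq_true, decide_eq_true_eq, beq_iff_eq]
    by_cases hle : (i : Int) ≤ k
    · simp [hle]
    · have hlt := pv_slice_len_lt tokens t k (i : Int) hk0 (by omega) (by exact_mod_cast hilt)
      have hne : t ≠ PySem.List.slice tokens (some (k - i)) (some (k - i + t.length)) := by
        intro h
        rw [← h] at hlt
        omega
      simp [hle, hne]

-- a fold over enumerate that only uses the element equals a plain fold
theorem pv_foldl_enumerate_snd {α β : Type} (F : β → α → β) (l : List α) (s : Int) (init : β) :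
    (PySem.List.enumerate l s).foldl (fun acc p => F acc p.2) init = l.foldl F init := by
  induction l generalizing s init with
  | nil => rfl
  | cons x xs ih => rw [PySem.List.enumerate_cons]; exact ih _ _

-- ===== VERDICT (by name: the statement is the Claim_ definition above) =====
theorem tag_pred_labels_spec : Claim_equal_tag_pred_labels := by
  intro doc_tokens pred_NPs _
  unfold Spec_tag_pred_labels tag_pred_labels tag_pred_labels_alt
  rw [show (PySem.Dict.ofList doc_tokens).values = (PySem.Dict.ofList doc_tokens).items.map (·.2) from rfl,
    List.foldl_map]
  apply PySem.List.foldl_congr_mem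
  intro out isents _
  rw [pv_foldl_enumerate_snd (fun pred_output tokens =>
    (PySem.List.enumerate tokens 0).foldl
      (fun pred_output ktoken =>
        let pred_output' := pred_output ++ ["O"]
        let filter_CP := pred_NPs.filter (fun t => decide (ktoken.2 ∈ t))
        let filter_CP := filter_CP.filter (fun t =>
          match PySem.List.index? t ktoken.2 with
          | some idx => t == PySem.List.slice tokens (some (ktoken.1 - (idx : Int))) (some (ktoken.1 - (idx : Int) + (t.length : Int)))
          | none => false)
        pred_output'.dropLast ++ [if filter_CP ≠ [] then "CP" else "O"])
      pred_output) isents.2 0 out]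
  apply PySem.List.foldl_congr_mem
  intro out2 tokens _
  apply PySem.List.foldl_congr_mem
  intro acc kp hkp
  obtain ⟨k, hk, rfl⟩ := (PySem.List.mem_enumerate_iff tokens 0 kp).mp hkp
  simp only [List.dropLast_concat, zero_add]
  congr 1
  have hk0 : (0 : Int) ≤ (k : Int) := by positivity
  by_cases hc : ((pvIndexNPs pred_NPs).getD tokens[k] []).any (fun pt =>
      decide (pt.1 ≤ (k : Int)) &&
        (pt.2 == PySem.List.slice tokens (some ((k : Int) - pt.1)) (some ((k : Int) - pt.1 + (pt.2.length : Int))))) = true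
  · rw [if_pos ((pv_cond_eq pred_NPs tokens tokens[k] (k : Int) hk0).mpr hc), if_pos hc]
  · rw [if_neg (fun h => hc ((pv_cond_eq pred_NPs tokens tokens[k] (k : Int) hk0).mp h)), if_neg hc]
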